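-- pv_equiv track=rewrite | github.com/chr0nu5/dex | backend/app.py | _form_variants_preference
-- ===== SOURCE A (Python) =====
-- def _form_variants_preference(form_tokens: list[str]) -> list[list[str]]:
--     """Gera combinações de forma em ordem de preferência."""
--     if not form_tokens:
--         return [[]]
--     ftset = set(form_tokens)
--     variants = []
--     for g in ["gigantamax-nosparks-nopowder", "gigantamax-nosparks", "gigantamax"]:
--         if g in ftset:
--             variants.append([g])
--     for t in form_tokens:
--         if not t.startswith("gigantamax"):
--             variants.append([t])
--     variants.append([])
--     seen, out = set(), []
--     for v in variants:
--         key = tuple(v)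
--         if key not in seen:
--             out.append(v)
--             seen.add(key)
--     return out
-- ===== SOURCE B (Python) =====
-- def _form_variants_preference(form_tokens: list[str]) -> list[list[str]]:
--     """Gera combinações de forma em ordem de preferência."""
--     if not form_tokens:
--         return [[]]
--     ftset = set(form_tokens)
--     giga = [g for g in ("gigantamax-nosparks-nopowder", "gigantamax-nosparks", "gigantamax") if g in ftset]
--     plain = dict.fromkeys(t for t in form_tokens if not t.startswith("gigantamax"))
--     return [[x] for x in giga] + [[t] for t in plain] + [[]]
-- ===== Notes on version B (the rewrite author's own statement) =====
-- stated objective: simpler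
-- what changed: Replaces the build-then-dedup two-phase loop (intermediate variants list plus a seen-set/out-list dedup pass) with direct construction: the gigantamax hits already have no duplicates, only the non-gigantamax tokens need deduplication (dict.fromkeys), and the three disjoint segments are concatenated.
import Mathlib
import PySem

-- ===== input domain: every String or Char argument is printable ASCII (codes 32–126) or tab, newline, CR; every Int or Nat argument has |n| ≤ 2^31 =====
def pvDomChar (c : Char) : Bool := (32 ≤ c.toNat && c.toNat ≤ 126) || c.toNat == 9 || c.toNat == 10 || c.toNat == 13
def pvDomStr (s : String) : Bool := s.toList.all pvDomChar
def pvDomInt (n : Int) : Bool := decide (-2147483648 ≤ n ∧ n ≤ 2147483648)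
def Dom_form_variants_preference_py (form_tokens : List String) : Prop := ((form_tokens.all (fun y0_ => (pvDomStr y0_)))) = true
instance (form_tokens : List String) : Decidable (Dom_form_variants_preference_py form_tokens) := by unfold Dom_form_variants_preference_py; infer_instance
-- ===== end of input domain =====

-- B drops the intermediate variants list and the trailing seen/out dedup pass: it builds the
-- three disjoint segments directly, deduplicating only the non-gigantamax tokens (dict.fromkeys).

-- ===== PORT A =====
def form_variants_preference_py (form_tokens : List String) : List (List String) :=
  if form_tokens = [] then [[]] else
    let ftset : PySem.Set String := PySem.Set.ofList form_tokens
    let variants : List (List String) :=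
      ["gigantamax-nosparks-nopowder", "gigantamax-nosparks", "gigantamax"].foldl
        (fun acc g => if PySem.Set.contains ftset g then acc ++ [[g]] else acc) []
    let variants :=
      form_tokens.foldl
        (fun acc t => if !PySem.Str.startswith t "gigantamax" then acc ++ [[t]] else acc) variants
    let variants := variants ++ [[]]
    -- seen is a set of tuples; tuple keys are in bijection with the list values, modelled as Set (List String)
    (variants.foldl
      (fun (p : PySem.Set (List String) × List (List String)) v =>
        if PySem.Set.contains p.1 v then p else (PySem.Set.add p.1 v, p.2 ++ [v]))
      (PySem.Set.empty, [])).2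

-- ===== PORT B =====
def form_variants_preference_py_alt (form_tokens : List String) : List (List String) :=
  if form_tokens = [] then [[]] else
    let ftset : PySem.Set String := PySem.Set.ofList form_tokens
    let giga := ["gigantamax-nosparks-nopowder", "gigantamax-nosparks", "gigantamax"].filter
      (fun g => PySem.Set.contains ftset g)
    let plain := PySem.List.dedup
      (form_tokens.filter (fun t => !PySem.Str.startswith t "gigantamax"))
    giga.map (fun x => [x]) ++ plain.map (fun t => [t]) ++ [[]]

-- ===== PRECONDITION & SPEC =====
def Spec_form_variants_preference_py (form_tokens : List String) (out : List (List String)) : Prop := out = form_variants_preference_py_alt form_tokens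
instance (form_tokens : List String) (out : List (List String)) : Decidable (Spec_form_variants_preference_py form_tokens out) := by unfold Spec_form_variants_preference_py; infer_instance

-- ===== CLAIM (what is proved, stated in full; the proofs are below) =====
def Claim_equal_form_variants_preference_py : Prop := ∀ (form_tokens : List String), Dom_form_variants_preference_py form_tokens → Spec_form_variants_preference_py form_tokens (form_variants_preference_py form_tokens)

-- ===== LEMMAS AND PROOFS =====

-- A's seen/out pair keeps seen = out at every step, so the dedup loop is foldl Set.add.
theorem dedup_fold_eq_add {α : Type} [BEq α] (l : List α) (s : PySem.Set α) :
    (l.foldl (fun (p : PySem.Set α × List α) v =>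
        if PySem.Set.contains p.1 v then p else (PySem.Set.add p.1 v, p.2 ++ [v])) (s, s)).2
      = l.foldl PySem.Set.add s := by
  induction l generalizing s with
  | nil => rfl
  | cons a l ih =>
    rw [List.foldl_cons, List.foldl_cons]
    have hX : (if PySem.Set.contains ((s, s) : PySem.Set α × List α).1 a = true
          then ((s, s) : PySem.Set α × List α)
          else (PySem.Set.add ((s, s) : PySem.Set α × List α).1 a,
                ((s, s) : PySem.Set α × List α).2 ++ [a]))
        = (PySem.Set.add s a, (PySem.Set.add s a : List α)) := by
      by_cases h : List.contains s a = true <;> simp [PySem.Set.add, PySem.Set.contains, h]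
    rw [hX]
    exact ih (PySem.Set.add s a)

-- folding Set.add over elements none of which are in the prefix s leaves s untouched up front
theorem foldl_add_append {α : Type} [BEq α] [LawfulBEq α] (l s t : List α)
    (h : ∀ v ∈ l, v ∉ s) :
    l.foldl PySem.Set.add (s ++ t) = s ++ l.foldl PySem.Set.add t := by
  induction l generalizing t with
  | nil => rfl
  | cons a l ih =>
    rw [List.foldl_cons, List.foldl_cons]
    have ha : a ∉ s := h a (List.mem_cons_self ..)
    have hstep : PySem.Set.add (s ++ t) a = s ++ PySem.Set.add t a := by
      by_cases h2 : a ∈ t <;>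
        simp [PySem.Set.add, PySem.Set.contains, ha, h2, List.append_assoc]
    rw [hstep, ih _ (fun v hv => h v (List.mem_cons_of_mem _ hv))]

theorem foldl_add_nodup {α : Type} [BEq α] [LawfulBEq α] (l : List α) (h : l.Nodup) :
    l.foldl PySem.Set.add ([] : PySem.Set α) = l := by
  induction l with
  | nil => rfl
  | cons a l ih =>
    rw [List.foldl_cons]
    have hstep : PySem.Set.add ([] : PySem.Set α) a = [a] := by
      simp [PySem.Set.add, PySem.Set.contains]
    rw [hstep]
    have ha : ∀ v ∈ l, v ∉ [a] := by
      intro v hv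
      simp only [List.mem_singleton]
      rintro rfl
      exact (List.nodup_cons.mp h).1 hv
    have h2 := foldl_add_append l [a] [] ha
    simp only [List.append_nil] at h2
    rw [h2, ih (List.nodup_cons.mp h).2]
    rfl

-- dedup commutes with mapping an injective function
theorem foldl_add_map_inj {α β : Type} [BEq α] [LawfulBEq α] [BEq β] [LawfulBEq β] (f : α → β)
    (hf : Function.Injective f) (l s : List α) :
    (l.map f).foldl PySem.Set.add (s.map f) = (l.foldl PySem.Set.add s).map f := by
  induction l generalizing s with
  | nil => rfl
  | cons a l ih =>
    rw [List.map_cons, List.foldl_cons, List.foldl_cons]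
    have hstep : PySem.Set.add (s.map f) (f a) = (PySem.Set.add s a).map f := by
      by_cases h : a ∈ s
      · simp [PySem.Set.add, PySem.Set.contains, h, List.mem_map.mpr ⟨a, h, rfl⟩]
      · have hfm : f a ∉ s.map f := by
          intro hm
          obtain ⟨x, hx, he⟩ := List.mem_map.mp hm
          exact h (hf he ▸ hx)
        simp [PySem.Set.add, PySem.Set.contains, h, hfm]
    rw [hstep, ← ih (PySem.Set.add s a)]

theorem dedup_map_inj {α β : Type} [BEq α] [LawfulBEq α] [BEq β] [LawfulBEq β] (f : α → β)
    (hf : Function.Injective f) (l : List α) :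
    PySem.List.dedup (l.map f) = (PySem.List.dedup l).map f := by
  have h := foldl_add_map_inj f hf l []
  simpa [PySem.List.dedup, PySem.Set.ofList_eq_foldl] using h

theorem singleton_inj {α : Type} : Function.Injective (fun x : α => [x]) := by
  intro a b h; simpa using h

-- ===== VERDICT (by name: the statement is the Claim_ definition above) =====
theorem form_variants_preference_py_spec : Claim_equal_form_variants_preference_py := by
  intro ts _
  show form_variants_preference_py ts = form_variants_preference_py_alt ts
  unfold form_variants_preference_py form_variants_preference_py_alt
  by_cases hts : ts = []
  · simp [hts]
  simp only [hts, if_false]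
  set gl := ["gigantamax-nosparks-nopowder", "gigantamax-nosparks", "gigantamax"] with hgl
  set P : String → Bool := fun g => PySem.Set.contains (PySem.Set.ofList ts) g with hP
  set Q : String → Bool := fun t => !PySem.Str.startswith t "gigantamax" with hQ
  set gigaV : List (List String) := (gl.filter P).map (fun x => [x]) with hgig
  set plainRaw : List (List String) := (ts.filter Q).map (fun t => [t]) with hpl
  -- phase 1: the two building loops produce gigaV ++ plainRaw ++ [[]]
  rw [PySem.List.foldl_append_if P (fun g => [g]), PySem.List.foldl_append_if Q (fun t => [t])]
  simp only [List.nil_append]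
  -- phase 2: the dedup loop is foldl Set.add from the empty set
  rw [show ((PySem.Set.empty : PySem.Set (List String)), ([] : List (List String)))
        = (([] : List (List String)), ([] : List (List String))) from rfl]
  rw [dedup_fold_eq_add]
  -- split the fold along the three disjoint segments
  have hgigN : gigaV.Nodup := by
    apply List.Nodup.map singleton_inj
    exact List.Nodup.filter _ (by rw [hgl]; decide)
  have hgigaStarts : ∀ x ∈ gl.filter P, PySem.Str.startswith x "gigantamax" = true := by
    intro x hx
    have hm := List.mem_of_mem_filter hx
    rw [hgl] at hm
    fin_cases hm <;> decide
  have hdisj : ∀ v ∈ plainRaw ++ [[]], v ∉ gigaV := by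
    intro v hv hvg
    rw [hgig] at hvg
    obtain ⟨g, hg, rfl⟩ := List.mem_map.mp hvg
    rcases List.mem_append.mp hv with h | h
    · rw [hpl] at h
      obtain ⟨t, ht, he⟩ := List.mem_map.mp h
      have hteq : t = g := by simpa using he
      have hq := List.of_mem_filter ht
      rw [hteq, hQ] at hq
      simp only [hgigaStarts g hg, Bool.not_true] at hq
      exact absurd hq (by simp)
    · simp at h
  rw [show gigaV ++ plainRaw ++ [[]] = gigaV ++ (plainRaw ++ [[]]) from by
        rw [List.append_assoc]]
  rw [List.foldl_append, foldl_add_nodup _ hgigN]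
  have h1 := foldl_add_append (plainRaw ++ [[]]) gigaV [] hdisj
  simp only [List.append_nil] at h1
  rw [h1]
  -- plain segment then the final []
  have hplain : (plainRaw.foldl PySem.Set.add ([] : PySem.Set (List String)))
      = (PySem.List.dedup (ts.filter Q)).map (fun t => [t]) := by
    rw [hpl, ← dedup_map_inj _ singleton_inj]
    simp [PySem.List.dedup, PySem.Set.ofList_eq_foldl]
  have hnil : ([] : List String) ∉ plainRaw.foldl PySem.Set.add ([] : PySem.Set (List String)) := by
    rw [hplain]
    intro hm
    obtain ⟨t, _, he⟩ := List.mem_map.mp hm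
    simp at he
  rw [List.foldl_append, List.foldl_cons, List.foldl_nil]
  have hlast : PySem.Set.add (plainRaw.foldl PySem.Set.add ([] : PySem.Set (List String))) []
      = plainRaw.foldl PySem.Set.add ([] : PySem.Set (List String)) ++ [[]] := by
    simp [PySem.Set.add, PySem.Set.contains, hnil]
  rw [hlast, hplain, List.append_assoc]
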